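-- pv_equiv track=rewrite | github.com/Zoey7788byte/Cache_assist_meta_bo | DatasetManager.py | _match_model_id
-- ===== SOURCE A (Python) =====
-- def _match_model_id(category, model_id_to_category):
--     """匹配类别到模型ID"""
--     if not model_id_to_category:
--         return None
--     for model_id, cat in model_id_to_category.items():
--         if category.lower() == cat.lower():
--             return model_id
--     for model_id, cat in model_id_to_category.items():
--         if category.lower() in cat.lower():
--             return model_id
--     return None
-- ===== SOURCE B (Python) =====
-- def _match_model_id(category, model_id_to_category):
--     """匹配类别到模型ID (single pass: exact match wins, first substring match kept as fallback)"""
--     candidate = None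
--     for model_id, cat in model_id_to_category.items():
--         if category.lower() == cat.lower():
--             return model_id
--         if candidate is None and category.lower() in cat.lower():
--             candidate = model_id
--     return candidate
-- ===== Notes on version B (the rewrite author's own statement) =====
-- stated objective: simpler
-- what changed: Replaced A's empty-dict guard plus two separate passes (exact pass, then substring pass) by one single loop that returns immediately on an exact case-insensitive match and records the first substring match as a fallback candidate returned after the loop.
import Mathlib
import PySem

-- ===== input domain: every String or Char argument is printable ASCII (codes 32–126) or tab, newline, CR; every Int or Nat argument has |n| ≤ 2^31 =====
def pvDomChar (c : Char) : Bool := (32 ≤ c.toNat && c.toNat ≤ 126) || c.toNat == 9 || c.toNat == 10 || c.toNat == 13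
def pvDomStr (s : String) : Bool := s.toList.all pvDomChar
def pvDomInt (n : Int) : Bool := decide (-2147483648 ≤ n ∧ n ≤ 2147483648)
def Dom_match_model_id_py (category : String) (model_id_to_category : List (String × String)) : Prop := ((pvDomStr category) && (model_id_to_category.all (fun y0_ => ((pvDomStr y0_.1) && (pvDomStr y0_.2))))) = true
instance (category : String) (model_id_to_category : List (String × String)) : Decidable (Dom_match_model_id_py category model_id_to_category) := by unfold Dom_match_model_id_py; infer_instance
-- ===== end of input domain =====

-- B folds A's empty-dict guard and two passes (exact, then substring) into one loop with a
-- fallback candidate; same return value everywhere.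

-- ===== PORT A =====
-- first loop of A: return model_id on the first exact case-insensitive match
def pvALoopExact (category : String) : List (String × String) → Option String
  | [] => none
  | (model_id, cat) :: rest =>
    if PySem.Str.lower category == PySem.Str.lower cat then some model_id
    else pvALoopExact category rest

-- second loop of A: return model_id on the first case-insensitive substring match
def pvALoopSub (category : String) : List (String × String) → Option String
  | [] => none
  | (model_id, cat) :: rest =>
    if PySem.Str.isIn (PySem.Str.lower category) (PySem.Str.lower cat) then some model_id
    else pvALoopSub category rest

def match_model_id_py (category : String) (model_id_to_category : List (String × String)) : Option String :=
  if model_id_to_category.isEmpty then none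
  else
    match pvALoopExact category model_id_to_category with
    | some model_id => some model_id
    | none =>
      match pvALoopSub category model_id_to_category with
      | some model_id => some model_id
      | none => none

-- ===== PORT B =====
-- B's single loop: exact match returns at once; first substring match is recorded in `candidate`
def pvBLoop (category : String) : List (String × String) → Option String → Option String
  | [], candidate => candidate
  | (model_id, cat) :: rest, candidate =>
    if PySem.Str.lower category == PySem.Str.lower cat then some model_id
    else if candidate.isNone && PySem.Str.isIn (PySem.Str.lower category) (PySem.Str.lower cat) then
      pvBLoop category rest (some model_id)
    else pvBLoop category rest candidate

def match_model_id_py_alt (category : String) (model_id_to_category : List (String × String)) : Option String :=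
  pvBLoop category model_id_to_category none

-- ===== PRECONDITION & SPEC =====
def Spec_match_model_id_py (category : String) (model_id_to_category : List (String × String)) (out : Option String) : Prop := out = match_model_id_py_alt category model_id_to_category
instance (category : String) (model_id_to_category : List (String × String)) (out : Option String) : Decidable (Spec_match_model_id_py category model_id_to_category out) := by unfold Spec_match_model_id_py; infer_instance

-- ===== CLAIM (what is proved, stated in full; the proofs are below) =====
def Claim_equal_match_model_id_py : Prop := ∀ (category : String) (model_id_to_category : List (String × String)), Dom_match_model_id_py category model_id_to_category → Spec_match_model_id_py category model_id_to_category (match_model_id_py category model_id_to_category)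

-- ===== LEMMAS AND PROOFS =====

-- B's loop characterised: an exact match wins; otherwise a non-none candidate is kept;
-- otherwise the first substring match of the remaining list.
theorem pvBLoop_eq (category : String) (l : List (String × String)) (candidate : Option String) :
    pvBLoop category l candidate =
      match pvALoopExact category l with
      | some m => some m
      | none => match candidate with
                | some c => some c
                | none => pvALoopSub category l := by
  induction l generalizing candidate with
  | nil => cases candidate <;> simp [pvBLoop, pvALoopExact, pvALoopSub]
  | cons p rest ih =>
    obtain ⟨model_id, cat⟩ := p
    by_cases he : PySem.Str.lower category == PySem.Str.lower cat
    · simp [pvBLoop, pvALoopExact, he]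
    · cases candidate <;>
        simp [pvBLoop, pvALoopExact, pvALoopSub, he, ih] <;>
        cases pvALoopExact category rest <;> simp

theorem match_model_id_py_eq_alt (category : String) (l : List (String × String)) :
    match_model_id_py category l = match_model_id_py_alt category l := by
  unfold match_model_id_py match_model_id_py_alt
  rw [pvBLoop_eq]
  cases l with
  | nil => simp [pvALoopExact, pvALoopSub]
  | cons p rest =>
    simp only [List.isEmpty_cons, if_neg Bool.false_ne_true]
    cases pvALoopExact category (p :: rest) <;> cases pvALoopSub category (p :: rest) <;> simp

-- ===== VERDICT (by name: the statement is the Claim_ definition above) =====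
theorem match_model_id_py_spec : Claim_equal_match_model_id_py := by
  intro category l _
  unfold Spec_match_model_id_py
  exact match_model_id_py_eq_alt category l
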